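-- pv_equiv track=rewrite | github.com/tom-kirby7/password-checker | test.py | score_variety
-- ===== SOURCE A (Python) =====
-- def score_variety(password):
--     """Calculate the variety score out of 100 with penalties for overly simple passwords."""
--     has_lower = any(c.islower() for c in password)
--     has_upper = any(c.isupper() for c in password)
--     has_digit = any(c.isdigit() for c in password)
--     has_symbol = any(not c.isalnum() for c in password)
--     types_used = sum([has_lower, has_upper, has_digit, has_symbol])
--     base_score = {1: 25, 2: 50, 3: 75, 4: 100}.get(types_used, 0)  # Scale variety to a maximum of 100
--     if types_used == 1 and len(password) <= 6:  # Penalize overly simple passwords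
--         base_score -= 20
--     return max(base_score, 0)  # Ensure score is not negative
-- ===== SOURCE B (Python) =====
-- def score_variety(password):
--     """Calculate the variety score out of 100 with penalties for overly simple passwords."""
--     has_lower = has_upper = has_digit = has_symbol = False
--     n = 0
--     for c in password:
--         n += 1
--         if c.islower():
--             has_lower = True
--         elif c.isupper():
--             has_upper = True
--         elif c.isdigit():
--             has_digit = True
--         elif not c.isalnum():
--             has_symbol = True
--     types_used = has_lower + has_upper + has_digit + has_symbol
--     base_score = types_used * 25
--     if types_used == 1 and n <= 6:
--         base_score -= 20
--     return max(base_score, 0)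
-- ===== Notes on version B (the rewrite author's own statement) =====
-- stated objective: faster
-- what changed: B replaces A's four separate any-scans and dict lookup by a single pass maintaining four flags and a length counter, with the closed form types_used*25 for the score.
import Mathlib
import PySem

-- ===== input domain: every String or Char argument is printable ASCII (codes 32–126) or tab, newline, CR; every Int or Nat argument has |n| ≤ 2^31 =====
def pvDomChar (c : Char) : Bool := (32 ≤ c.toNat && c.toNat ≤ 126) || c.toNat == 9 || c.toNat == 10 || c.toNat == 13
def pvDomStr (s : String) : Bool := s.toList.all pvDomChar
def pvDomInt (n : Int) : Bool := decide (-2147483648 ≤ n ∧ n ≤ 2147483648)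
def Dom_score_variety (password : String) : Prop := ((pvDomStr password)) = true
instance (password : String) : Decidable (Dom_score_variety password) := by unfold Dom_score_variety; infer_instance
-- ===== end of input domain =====

-- B replaces A's four separate any-scans and dict lookup by one pass maintaining four flags
-- and a length counter, with the closed form types_used*25 (objective: simpler).


-- ===== PORT A =====
def score_variety (password : String) : Int :=
  let has_lower := password.toList.any (fun c => PySem.Chars.islower c)
  let has_upper := password.toList.any (fun c => PySem.Chars.isupper c)
  let has_digit := password.toList.any (fun c => PySem.Chars.isdigit c)
  let has_symbol := password.toList.any (fun c => !PySem.Chars.isalnum c)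
  let types_used : Int :=
    [has_lower, has_upper, has_digit, has_symbol].foldl
      (fun a b => a + (if b then 1 else 0)) 0
  let base_score : Int :=
    (PySem.Dict.ofList [((1:Int),(25:Int)),(2,50),(3,75),(4,100)]).getD types_used 0
  let base_score :=
    if types_used = 1 ∧ PySem.Str.len password ≤ 6 then base_score - 20 else base_score
  max base_score 0

-- ===== PORT B =====
def score_variety_alt_loop (cs : List Char) (hl hu hd hs : Bool) (n : Int) :
    Bool × Bool × Bool × Bool × Int :=
  match cs with
  | [] => (hl, hu, hd, hs, n)
  | c :: rest =>
      if PySem.Chars.islower c then score_variety_alt_loop rest true hu hd hs (n + 1)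
      else if PySem.Chars.isupper c then score_variety_alt_loop rest hl true hd hs (n + 1)
      else if PySem.Chars.isdigit c then score_variety_alt_loop rest hl hu true hs (n + 1)
      else if ! PySem.Chars.isalnum c then score_variety_alt_loop rest hl hu hd true (n + 1)
      else score_variety_alt_loop rest hl hu hd hs (n + 1)

def score_variety_alt (password : String) : Int :=
  let (hl, hu, hd, hs, n) := score_variety_alt_loop password.toList false false false false 0
  let types_used : Int :=
    (if hl then 1 else 0) + (if hu then 1 else 0) + (if hd then 1 else 0) + (if hs then 1 else 0)
  let base_score := types_used * 25
  let base_score := if types_used = 1 ∧ n ≤ 6 then base_score - 20 else base_score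
  max base_score 0

-- ===== PRECONDITION & SPEC =====
def Spec_score_variety (password : String) (out : Int) : Prop := out = score_variety_alt password
instance (password : String) (out : Int) : Decidable (Spec_score_variety password out) := by unfold Spec_score_variety; infer_instance

-- ===== CLAIM (what is proved, stated in full; the proofs are below) =====
def Claim_equal_score_variety : Prop := ∀ (password : String), Dom_score_variety password → Spec_score_variety password (score_variety password)

-- ===== LEMMAS AND PROOFS =====

theorem score_variety_loop_char (cs : List Char) (hl hu hd hs : Bool) (n : Int) :
    score_variety_alt_loop cs hl hu hd hs n =
      (hl || cs.any (fun c => PySem.Chars.islower c),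
       hu || cs.any (fun c => PySem.Chars.isupper c),
       hd || cs.any (fun c => PySem.Chars.isdigit c),
       hs || cs.any (fun c => !PySem.Chars.isalnum c),
       n + cs.length) := by
  induction cs generalizing hl hu hd hs n with
  | nil => simp [score_variety_alt_loop]
  | cons c rest ih =>
    have hal : PySem.Chars.islower c = true → PySem.Chars.isalnum c = true := fun h => by
      simp [PySem.Chars.isalnum, PySem.Chars.isalpha, h]
    have hau : PySem.Chars.isupper c = true → PySem.Chars.isalnum c = true := fun h => by
      simp [PySem.Chars.isalnum, PySem.Chars.isalpha, h]
    have had : PySem.Chars.isdigit c = true → PySem.Chars.isalnum c = true := fun h => by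
      simp [PySem.Chars.isalnum, h]
    have hlu : PySem.Chars.islower c = true → PySem.Chars.isupper c = false := by
      intro h
      simp only [PySem.Chars.islower, Bool.and_eq_true, decide_eq_true_eq] at h
      have h2 : ¬ (c ≤ 'Z') := fun h2 => absurd (le_trans h.1 h2) (by decide)
      simp [PySem.Chars.isupper, h2]
    have hld : PySem.Chars.islower c = true → PySem.Chars.isdigit c = false := by
      intro h
      simp only [PySem.Chars.islower, Bool.and_eq_true, decide_eq_true_eq] at h
      have h2 : ¬ (c ≤ '9') := fun h2 => absurd (le_trans h.1 h2) (by decide)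
      simp [PySem.Chars.isdigit, h2]
    have hud : PySem.Chars.isupper c = true → PySem.Chars.isdigit c = false := by
      intro h
      simp only [PySem.Chars.isupper, Bool.and_eq_true, decide_eq_true_eq] at h
      have h2 : ¬ (c ≤ '9') := fun h2 => absurd (le_trans h.1 h2) (by decide)
      simp [PySem.Chars.isdigit, h2]
    simp only [score_variety_alt_loop, List.any_cons, List.length_cons]
    split_ifs with h1 h2 h3 h4
    · rw [ih]; simp [h1, hal h1, hlu h1, hld h1]; omega
    · rw [ih]; simp [h1, h2, hau h2, hud h2]; omega
    · rw [ih]; simp [h1, h2, h3, had h3]; ring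
    · rw [ih]; simp at h4; simp [h1, h2, h3, h4]; ring
    · rw [ih]
      simp only [Bool.not_eq_true] at h4
      simp at h4
      simp [h1, h2, h3, h4]; omega

theorem score_variety_spec' (password : String) :
    score_variety password = score_variety_alt password := by
  have g0 : (PySem.Dict.ofList [((1:Int),(25:Int)),(2,50),(3,75),(4,100)]).getD 0 0 = 0 := by decide
  have g1 : (PySem.Dict.ofList [((1:Int),(25:Int)),(2,50),(3,75),(4,100)]).getD 1 0 = 25 := by decide
  have g2 : (PySem.Dict.ofList [((1:Int),(25:Int)),(2,50),(3,75),(4,100)]).getD 2 0 = 50 := by decide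
  have g3 : (PySem.Dict.ofList [((1:Int),(25:Int)),(2,50),(3,75),(4,100)]).getD 3 0 = 75 := by decide
  have g4 : (PySem.Dict.ofList [((1:Int),(25:Int)),(2,50),(3,75),(4,100)]).getD 4 0 = 100 := by decide
  unfold score_variety score_variety_alt
  rw [score_variety_loop_char]
  cases hL : password.toList.any (fun c => PySem.Chars.islower c) <;>
  cases hU : password.toList.any (fun c => PySem.Chars.isupper c) <;>
  cases hD : password.toList.any (fun c => PySem.Chars.isdigit c) <;>
  cases hS : password.toList.any (fun c => !PySem.Chars.isalnum c) <;>
    simp [g0, g1, g2, g3, g4, PySem.Str.len]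

-- ===== VERDICT (by name: the statement is the Claim_ definition above) =====
theorem score_variety_spec : Claim_equal_score_variety := by
  intro password _
  exact score_variety_spec' password
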